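-- pv_equiv track=rewrite | github.com/EvgJrv/gb_pythonbasics | lesson4.py | my_cycle
-- ===== SOURCE A (Python) =====
-- from itertools import count, cycle
--
-- def my_cycle(lst):
--     limit = 10
--     if isinstance(lst, (list, tuple, str)):
--         for k,v in enumerate(cycle(lst)):
--             if k == limit:
--                 break
--             else:
--                 yield v
-- ===== SOURCE B (Python) =====
-- def my_cycle(lst):
--     if isinstance(lst, (list, tuple, str)):
--         if not lst:
--             return
--         rep = lst * (10 // len(lst) + 1)
--         yield from rep[:10]
-- ===== Notes on version B (the rewrite author's own statement) =====
-- stated objective: simpler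
-- what changed: B materializes enough repetitions of the sequence (lst * (10//len(lst)+1)) and slices the first 10, instead of iterating itertools.cycle with an enumerate counter and break.
import Mathlib
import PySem

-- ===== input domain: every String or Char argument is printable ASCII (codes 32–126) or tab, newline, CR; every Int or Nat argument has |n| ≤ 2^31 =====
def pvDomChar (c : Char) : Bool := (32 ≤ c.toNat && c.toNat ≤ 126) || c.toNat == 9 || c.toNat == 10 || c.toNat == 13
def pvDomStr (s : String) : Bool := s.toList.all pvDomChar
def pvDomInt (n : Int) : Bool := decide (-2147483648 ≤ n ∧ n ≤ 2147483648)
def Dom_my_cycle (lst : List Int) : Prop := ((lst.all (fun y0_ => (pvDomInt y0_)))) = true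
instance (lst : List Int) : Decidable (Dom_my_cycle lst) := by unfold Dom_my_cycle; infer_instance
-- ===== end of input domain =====

-- B replaces the itertools.cycle + enumerate/break loop by materializing enough
-- repetitions of the list and slicing the first 10 (objective: simpler).
-- Both A and B are generators; the equivalence is about the list of yielded values.

-- ===== PORT A =====
-- the for-loop over cycle(lst): `rest` is what remains of the current pass of the
-- cycle iterator, `k` the remaining iterations until the enumerate counter hits limit;
-- when `rest` runs out, cycle restarts from lst (and stops if lst is empty).
def cycLoop (lst : List Int) : List Int → Nat → List Int
  | _, 0 => []
  | x :: xs, Nat.succ k => x :: cycLoop lst xs k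
  | [], Nat.succ k =>
    match lst with
    | [] => []
    | x :: xs => x :: cycLoop lst xs k

def my_cycle (lst : List Int) : List Int :=
  -- limit = 10; isinstance(lst,(list,tuple,str)) is true for a list argument
  cycLoop lst [] 10

-- ===== PORT B =====
def my_cycle_alt (lst : List Int) : List Int :=
  if lst = [] then []
  else
    -- rep = lst * (10 // len(lst) + 1); lengths are nonneg so Python // = Nat division
    let rep := (List.replicate (10 / lst.length + 1) lst).flatten
    -- rep[:10] with nonnegative bound = take 10
    rep.take 10

-- ===== PRECONDITION & SPEC =====
def Spec_my_cycle (lst : List Int) (out : List Int) : Prop := out = my_cycle_alt lst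
instance (lst : List Int) (out : List Int) : Decidable (Spec_my_cycle lst out) := by unfold Spec_my_cycle; infer_instance

-- ===== CLAIM (what is proved, stated in full; the proofs are below) =====
def Claim_equal_my_cycle : Prop := ∀ (lst : List Int), Dom_my_cycle lst → Spec_my_cycle lst (my_cycle lst)

-- ===== LEMMAS AND PROOFS =====
-- Invariant of A's loop: with enough material ahead (rest plus m further copies of lst),
-- the loop produces exactly the first k elements of rest ++ m copies of lst.
theorem cycLoop_eq_take (lst : List Int) :
    ∀ (k : Nat) (rest : List Int) (m : Nat),
      k ≤ rest.length + m * lst.length →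
      cycLoop lst rest k = (rest ++ (List.replicate m lst).flatten).take k := by
  intro k
  induction k with
  | zero => intro rest m _; simp [cycLoop]
  | succ k ih =>
    intro rest m h
    cases rest with
    | cons x xs =>
      simp only [cycLoop, List.cons_append, List.take_succ_cons]
      rw [ih xs m (by simp only [List.length_cons] at h; omega)]
    | nil =>
      cases m with
      | zero => simp at h
      | succ m' =>
        cases hl : lst with
        | nil => simp [hl] at h
        | cons y ys =>
          subst hl
          simp only [cycLoop]
          rw [ih ys m' (by simp only [List.length_nil, List.length_cons, Nat.succ_mul] at h ⊢; omega)]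
          simp [List.replicate_succ, List.take_succ_cons]

-- ===== VERDICT (by name: the statement is the Claim_ definition above) =====
theorem my_cycle_spec : Claim_equal_my_cycle := by
  intro lst _
  unfold Spec_my_cycle my_cycle my_cycle_alt
  by_cases h : lst = []
  · subst h; decide
  · simp only [if_neg h]
    have hn : 0 < lst.length := List.length_pos_iff.mpr h
    have hm : 10 ≤ ([] : List Int).length + (10 / lst.length + 1) * lst.length := by
      have hq := Nat.div_add_mod 10 lst.length
      rw [Nat.mul_comm] at hq
      have hmod := Nat.mod_lt 10 hn
      simp only [List.length_nil, Nat.zero_add, Nat.add_mul, Nat.one_mul]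
      omega
    have := cycLoop_eq_take lst 10 [] (10 / lst.length + 1) hm
    simpa using this
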